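-- pv_equiv track=rewrite | github.com/Santhakumarramesh/job-automation | services/resume_designer.py | _build_skills_dict
-- ===== SOURCE A (Python) =====
-- def _build_skills_dict(supported: list[str], partial: list[str]) -> dict[str, list[str]]:
--     """Organize skills into categories for the skills section."""
--     categories: dict[str, list[str]] = {
--         "Languages": [],
--         "ML / AI": [],
--         "Frameworks": [],
--         "Cloud & DevOps": [],
--         "Data & Databases": [],
--     }
--
--     ml_ai = {"pytorch", "tensorflow", "scikit-learn", "huggingface", "langchain", "llamaindex",
--               "rag", "fine_tuning", "nlp", "computer_vision", "openai"}
--     cloud = {"aws", "azure", "gcp", "docker", "kubernetes", "mlflow", "airflow"}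
--     data = {"sql", "spark", "vector_db", "data_analysis", "a_b_testing"}
--     langs = {"python", "typescript", "javascript"}
--     frameworks = {"fastapi", "flask", "django", "react"}
--
--     all_skills = set(supported) | set(partial)
--     for skill in sorted(all_skills):
--         display = skill.replace("_", " ").replace("-", " ").title()
--         if skill in langs:
--             categories["Languages"].append(display)
--         elif skill in ml_ai:
--             categories["ML / AI"].append(display)
--         elif skill in frameworks:
--             categories["Frameworks"].append(display)
--         elif skill in cloud:
--             categories["Cloud & DevOps"].append(display)
--         elif skill in data:
--             categories["Data & Databases"].append(display)
--
--     return {k: v for k, v in categories.items() if v}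
-- ===== SOURCE B (Python) =====
-- # B inverts the traversal: instead of sorting the input union and classifying each
-- # skill, it walks a fixed pre-sorted vocabulary table and keeps the members that
-- # are present in the input set -- no runtime sort, no classification chain.
-- _CATEGORIES = [
--     ("Languages", ["javascript", "python", "typescript"]),
--     ("ML / AI", ["computer_vision", "fine_tuning", "huggingface", "langchain",
--                  "llamaindex", "nlp", "openai", "pytorch", "rag",
--                  "scikit-learn", "tensorflow"]),
--     ("Frameworks", ["django", "fastapi", "flask", "react"]),
--     ("Cloud & DevOps", ["airflow", "aws", "azure", "docker", "gcp",
--                         "kubernetes", "mlflow"]),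
--     ("Data & Databases", ["a_b_testing", "data_analysis", "spark", "sql",
--                           "vector_db"]),
-- ]
--
--
-- def _build_skills_dict(supported: list[str], partial: list[str]) -> dict[str, list[str]]:
--     present = set(supported)
--     present.update(partial)
--     result: dict[str, list[str]] = {}
--     for name, members in _CATEGORIES:
--         row = [m.replace("_", " ").replace("-", " ").title()
--                for m in members if m in present]
--         if row:
--             result[name] = row
--     return result
-- ===== Notes on version B (the rewrite author's own statement) =====
-- stated objective: faster
-- what changed: B inverts the traversal: instead of sorting the deduplicated input union and classifying every skill through an elif chain, it builds a presence set from the inputs and scans a fixed pre-sorted vocabulary table, keeping (and title-casing) only the members present; the runtime sort and per-skill classification/formatting disappear.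
import Mathlib
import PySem

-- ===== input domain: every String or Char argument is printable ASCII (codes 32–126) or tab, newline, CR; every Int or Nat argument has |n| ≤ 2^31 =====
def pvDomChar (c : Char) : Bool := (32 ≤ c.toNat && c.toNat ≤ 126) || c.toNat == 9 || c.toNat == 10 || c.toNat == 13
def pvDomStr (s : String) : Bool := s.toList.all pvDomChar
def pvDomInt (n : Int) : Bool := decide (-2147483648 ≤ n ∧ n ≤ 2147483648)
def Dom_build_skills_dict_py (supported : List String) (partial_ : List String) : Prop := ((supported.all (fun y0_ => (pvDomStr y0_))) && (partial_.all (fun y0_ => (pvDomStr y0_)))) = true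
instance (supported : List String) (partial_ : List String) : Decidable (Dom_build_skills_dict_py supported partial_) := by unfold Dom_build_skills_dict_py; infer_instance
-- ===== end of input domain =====

-- B inverts the traversal: instead of sorting the input union and classifying each
-- skill through the elif chain, it scans a fixed pre-sorted vocabulary table and keeps
-- the members present in the input set; objective: faster (measured).

-- ===== PORT A =====
-- the five membership sets (Python set literals of distinct strings; used only for membership)
def langsS : List String := ["python", "typescript", "javascript"]
def mlaiS : List String := ["pytorch", "tensorflow", "scikit-learn", "huggingface", "langchain",
  "llamaindex", "rag", "fine_tuning", "nlp", "computer_vision", "openai"]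
def frameworksS : List String := ["fastapi", "flask", "django", "react"]
def cloudS : List String := ["aws", "azure", "gcp", "docker", "kubernetes", "mlflow", "airflow"]
def dataS : List String := ["sql", "spark", "vector_db", "data_analysis", "a_b_testing"]

-- hand port of str.title(): exact on ASCII (a char is cased iff isAlpha; an alpha char is
-- upper-cased after a non-alpha char and lower-cased otherwise)
def pyTitleChars : List Char → Bool → List Char
  | [], _ => []
  | c :: cs, prev =>
    (if c.isAlpha then (if prev then c.toLower else c.toUpper) else c) :: pyTitleChars cs c.isAlpha

-- skill.replace("_", " ").replace("-", " ").title()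
def displaySkill (s : String) : String :=
  String.ofList (pyTitleChars (PySem.Str.replace (PySem.Str.replace s "_" " ") "-" " ").toList false)

def aCatInit : PySem.Dict String (List String) :=
  PySem.Dict.ofList [("Languages", []), ("ML / AI", []), ("Frameworks", []),
    ("Cloud & DevOps", []), ("Data & Databases", [])]

-- the for-loop: each branch appends display to that category's list
def aLoop : List String → PySem.Dict String (List String) → PySem.Dict String (List String)
  | [], d => d
  | skill :: rest, d =>
    let disp := displaySkill skill
    let d' :=
      if langsS.contains skill then PySem.Dict.modify d "Languages" [] (· ++ [disp])
      else if mlaiS.contains skill then PySem.Dict.modify d "ML / AI" [] (· ++ [disp])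
      else if frameworksS.contains skill then PySem.Dict.modify d "Frameworks" [] (· ++ [disp])
      else if cloudS.contains skill then PySem.Dict.modify d "Cloud & DevOps" [] (· ++ [disp])
      else if dataS.contains skill then PySem.Dict.modify d "Data & Databases" [] (· ++ [disp])
      else d
    aLoop rest d'

def build_skills_dict_py (supported : List String) (partial_ : List String) : List (String × List String) :=
  let all_skills := PySem.Set.union (PySem.Set.ofList supported) (PySem.Set.ofList partial_)
  let categories := aLoop (PySem.List.sorted all_skills (fun x => x) false) aCatInit
  categories.items.filter (fun kv => !kv.2.isEmpty)

-- ===== PORT B =====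
-- fixed category table; each member list is a pre-sorted (strictly increasing) literal
def tableB : List (String × List String) :=
  [("Languages", ["javascript", "python", "typescript"]),
   ("ML / AI", ["computer_vision", "fine_tuning", "huggingface", "langchain", "llamaindex",
                "nlp", "openai", "pytorch", "rag", "scikit-learn", "tensorflow"]),
   ("Frameworks", ["django", "fastapi", "flask", "react"]),
   ("Cloud & DevOps", ["airflow", "aws", "azure", "docker", "gcp", "kubernetes", "mlflow"]),
   ("Data & Databases", ["a_b_testing", "data_analysis", "spark", "sql", "vector_db"])]

def build_skills_dict_py_alt (supported : List String) (partial_ : List String) : List (String × List String) :=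
  let present := PySem.Set.update (PySem.Set.ofList supported) partial_
  tableB.foldl (fun result nb =>
    let row := (nb.2.filter (fun m => PySem.Set.contains present m)).map displaySkill
    if row.isEmpty then result else result ++ [(nb.1, row)]) []

-- ===== PRECONDITION & SPEC =====
-- A is total: no Pre_.
def Spec_build_skills_dict_py (supported : List String) (partial_ : List String) (out : List (String × List String)) : Prop := out = build_skills_dict_py_alt supported partial_
instance (supported : List String) (partial_ : List String) (out : List (String × List String)) : Decidable (Spec_build_skills_dict_py supported partial_ out) := by unfold Spec_build_skills_dict_py; infer_instance

-- ===== CLAIM =====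
def Claim_equal_build_skills_dict_py : Prop := ∀ (supported : List String) (partial_ : List String), Dom_build_skills_dict_py supported partial_ → Spec_build_skills_dict_py supported partial_ (build_skills_dict_py supported partial_)

-- ===== LEMMAS AND PROOFS =====

-- the effective category predicates of A's elif chain
def q1 (s : String) : Bool := langsS.contains s
def q2 (s : String) : Bool := !langsS.contains s && mlaiS.contains s
def q3 (s : String) : Bool := !langsS.contains s && !mlaiS.contains s && frameworksS.contains s
def q4 (s : String) : Bool := !langsS.contains s && !mlaiS.contains s && !frameworksS.contains s && cloudS.contains s
def q5 (s : String) : Bool := !langsS.contains s && !mlaiS.contains s && !frameworksS.contains s && !cloudS.contains s && dataS.contains s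

-- abbreviation for the 5-key category dict shape A's loop preserves
def catDict (l1 l2 l3 l4 l5 : List String) : PySem.Dict String (List String) :=
  ⟨[("Languages", l1), ("ML / AI", l2), ("Frameworks", l3), ("Cloud & DevOps", l4), ("Data & Databases", l5)]⟩

lemma modify1 (l1 l2 l3 l4 l5 : List String) (f : List String → List String) :
    PySem.Dict.modify (catDict l1 l2 l3 l4 l5) "Languages" [] f = catDict (f l1) l2 l3 l4 l5 := rfl
lemma modify2 (l1 l2 l3 l4 l5 : List String) (f : List String → List String) :
    PySem.Dict.modify (catDict l1 l2 l3 l4 l5) "ML / AI" [] f = catDict l1 (f l2) l3 l4 l5 := rfl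
lemma modify3 (l1 l2 l3 l4 l5 : List String) (f : List String → List String) :
    PySem.Dict.modify (catDict l1 l2 l3 l4 l5) "Frameworks" [] f = catDict l1 l2 (f l3) l4 l5 := rfl
lemma modify4 (l1 l2 l3 l4 l5 : List String) (f : List String → List String) :
    PySem.Dict.modify (catDict l1 l2 l3 l4 l5) "Cloud & DevOps" [] f = catDict l1 l2 l3 (f l4) l5 := rfl
lemma modify5 (l1 l2 l3 l4 l5 : List String) (f : List String → List String) :
    PySem.Dict.modify (catDict l1 l2 l3 l4 l5) "Data & Databases" [] f = catDict l1 l2 l3 l4 (f l5) := rfl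

lemma aLoop_inv (S : List String) (l1 l2 l3 l4 l5 : List String) :
    aLoop S (catDict l1 l2 l3 l4 l5) =
      catDict (l1 ++ (S.filter q1).map displaySkill) (l2 ++ (S.filter q2).map displaySkill)
        (l3 ++ (S.filter q3).map displaySkill) (l4 ++ (S.filter q4).map displaySkill)
        (l5 ++ (S.filter q5).map displaySkill) := by
  induction S generalizing l1 l2 l3 l4 l5 with
  | nil => simp [aLoop]
  | cons s rest ih =>
    by_cases h1 : s ∈ langsS <;> by_cases h2 : s ∈ mlaiS <;>
      by_cases h3 : s ∈ frameworksS <;> by_cases h4 : s ∈ cloudS <;>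
      by_cases h5 : s ∈ dataS <;>
      simp [aLoop, h1, h2, h3, h4, h5, modify1, modify2, modify3, modify4, modify5, ih,
        q1, q2, q3, q4, q5]

-- sorted(set(a) | set(b)) = sorted(dict.fromkeys(a + b)): nodup lists with the same members
lemma sorted_union_eq (a b : List String) :
    PySem.List.sorted (PySem.Set.union (PySem.Set.ofList a) (PySem.Set.ofList b)) (fun x => x) false
      = PySem.List.sorted (PySem.List.dedup (a ++ b)) (fun x => x) false := by
  apply PySem.List.sorted_eq_sorted_of_perm _ _ _ (fun x y h => h)
  rw [PySem.List.dedup_eq_ofList]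
  refine (List.perm_ext_iff_of_nodup
    (PySem.Set.nodup_union _ _ (PySem.Set.nodup_ofList a)) (PySem.Set.nodup_ofList _)).2 ?_
  intro x
  simp [PySem.Set.mem_union, PySem.Set.mem_ofList]

-- filtering A's sorted union by a category predicate = filtering that category's
-- pre-sorted member list by presence in the input set
lemma core (a b members : List String) (hms : members.Pairwise (· < ·)) (q : String → Bool)
    (hq : ∀ x, q x = true ↔ x ∈ members) :
    (PySem.List.sorted (PySem.Set.union (PySem.Set.ofList a) (PySem.Set.ofList b)) (fun x => x) false).filter q
      = members.filter (fun m => PySem.Set.contains (PySem.Set.update (PySem.Set.ofList a) b) m) := by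
  rw [sorted_union_eq, PySem.List.dedup_eq_ofList]
  have hSp : ((PySem.List.sorted (PySem.Set.ofList (a ++ b)) (fun x => x) false).filter q).Pairwise (· < ·) :=
    List.Pairwise.filter q (PySem.List.sorted_ofList_pairwise_lt _)
  have hRp : (members.filter (fun m => PySem.Set.contains (PySem.Set.update (PySem.Set.ofList a) b) m)).Pairwise (· < ·) :=
    List.Pairwise.filter _ hms
  have hperm : ((PySem.List.sorted (PySem.Set.ofList (a ++ b)) (fun x => x) false).filter q).Perm
      (members.filter (fun m => PySem.Set.contains (PySem.Set.update (PySem.Set.ofList a) b) m)) := by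
    refine (List.perm_ext_iff_of_nodup (hSp.imp ne_of_lt) (hRp.imp ne_of_lt)).2 ?_
    intro x
    simp only [List.mem_filter, PySem.List.mem_sorted, PySem.Set.mem_ofList, List.mem_append,
      PySem.Set.contains_iff, PySem.Set.mem_update, hq]
    tauto
  have e1 := PySem.List.sorted_eq_of_perm_of_pairwise_lt (key := fun x => x)
      (xs := members.filter (fun m => PySem.Set.contains (PySem.Set.update (PySem.Set.ofList a) b) m))
      (ys := (PySem.List.sorted (PySem.Set.ofList (a ++ b)) (fun x => x) false).filter q) hperm hSp
  have e2 := PySem.List.sorted_eq_of_perm_of_pairwise_lt (key := fun x => x)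
      (xs := members.filter (fun m => PySem.Set.contains (PySem.Set.update (PySem.Set.ofList a) b) m))
      (ys := members.filter (fun m => PySem.Set.contains (PySem.Set.update (PySem.Set.ofList a) b) m))
      (List.Perm.refl _) hRp
  rw [← e1, e2]

-- A's elif predicates coincide with plain membership in the (pairwise disjoint) category sets
lemma q1_mem (s : String) : q1 s = true ↔ s ∈ langsS := by
  simp [q1]
lemma q2_mem (s : String) : q2 s = true ↔ s ∈ mlaiS := by
  constructor
  · intro h; simp [q2] at h; tauto
  · intro h; fin_cases h <;> decide
lemma q3_mem (s : String) : q3 s = true ↔ s ∈ frameworksS := by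
  constructor
  · intro h; simp [q3] at h; tauto
  · intro h; fin_cases h <;> decide
lemma q4_mem (s : String) : q4 s = true ↔ s ∈ cloudS := by
  constructor
  · intro h; simp [q4] at h; tauto
  · intro h; fin_cases h <;> decide
lemma q5_mem (s : String) : q5 s = true ↔ s ∈ dataS := by
  constructor
  · intro h; simp [q5] at h; tauto
  · intro h; fin_cases h <;> decide

-- each q_i picks exactly the i-th table column (stated over the sorted literals)
lemma q1_col (s : String) : q1 s = true ↔ s ∈ (["javascript", "python", "typescript"] : List String) := by
  rw [q1_mem]; constructor <;> (intro h; fin_cases h <;> decide)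
lemma q2_col (s : String) : q2 s = true ↔ s ∈ (["computer_vision", "fine_tuning", "huggingface", "langchain", "llamaindex", "nlp", "openai", "pytorch", "rag", "scikit-learn", "tensorflow"] : List String) := by
  rw [q2_mem]; constructor <;> (intro h; fin_cases h <;> decide)
lemma q3_col (s : String) : q3 s = true ↔ s ∈ (["django", "fastapi", "flask", "react"] : List String) := by
  rw [q3_mem]; constructor <;> (intro h; fin_cases h <;> decide)
lemma q4_col (s : String) : q4 s = true ↔ s ∈ (["airflow", "aws", "azure", "docker", "gcp", "kubernetes", "mlflow"] : List String) := by
  rw [q4_mem]; constructor <;> (intro h; fin_cases h <;> decide)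
lemma q5_col (s : String) : q5 s = true ↔ s ∈ (["a_b_testing", "data_analysis", "spark", "sql", "vector_db"] : List String) := by
  rw [q5_mem]; constructor <;> (intro h; fin_cases h <;> decide)

lemma aCatInit_eq : aCatInit = catDict [] [] [] [] [] := rfl

-- ===== VERDICT =====
lemma pw_nil {α : Type} (R : α → α → Prop) : List.Pairwise R [] ↔ True :=
  ⟨fun _ => trivial, fun _ => List.Pairwise.nil⟩

-- the table's member lists are strictly increasing string literals
lemma pw1 : (["javascript", "python", "typescript"] : List String).Pairwise (· < ·) := by
  simp only [List.pairwise_cons, List.mem_cons, forall_eq_or_imp, forall_eq, List.not_mem_nil,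
    String.lt_iff_toList_lt, false_implies, implies_true, forall_const, and_true, true_and,
    pw_nil]
  repeat' apply And.intro
  all_goals decide
lemma pw2 : (["computer_vision", "fine_tuning", "huggingface", "langchain", "llamaindex",
    "nlp", "openai", "pytorch", "rag", "scikit-learn", "tensorflow"] : List String).Pairwise (· < ·) := by
  simp only [List.pairwise_cons, List.mem_cons, forall_eq_or_imp, forall_eq, List.not_mem_nil,
    String.lt_iff_toList_lt, false_implies, implies_true, forall_const, and_true, true_and,
    pw_nil]
  repeat' apply And.intro
  all_goals decide
lemma pw3 : (["django", "fastapi", "flask", "react"] : List String).Pairwise (· < ·) := by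
  simp only [List.pairwise_cons, List.mem_cons, forall_eq_or_imp, forall_eq, List.not_mem_nil,
    String.lt_iff_toList_lt, false_implies, implies_true, forall_const, and_true, true_and,
    pw_nil]
  repeat' apply And.intro
  all_goals decide
lemma pw4 : (["airflow", "aws", "azure", "docker", "gcp", "kubernetes", "mlflow"] : List String).Pairwise (· < ·) := by
  simp only [List.pairwise_cons, List.mem_cons, forall_eq_or_imp, forall_eq, List.not_mem_nil,
    String.lt_iff_toList_lt, false_implies, implies_true, forall_const, and_true, true_and,
    pw_nil]
  repeat' apply And.intro
  all_goals decide
lemma pw5 : (["a_b_testing", "data_analysis", "spark", "sql", "vector_db"] : List String).Pairwise (· < ·) := by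
  simp only [List.pairwise_cons, List.mem_cons, forall_eq_or_imp, forall_eq, List.not_mem_nil,
    String.lt_iff_toList_lt, false_implies, implies_true, forall_const, and_true, true_and,
    pw_nil]
  repeat' apply And.intro
  all_goals decide

theorem build_skills_dict_py_spec : Claim_equal_build_skills_dict_py := by
  intro supported partial_ _hdom
  show build_skills_dict_py supported partial_ = build_skills_dict_py_alt supported partial_
  unfold build_skills_dict_py build_skills_dict_py_alt
  dsimp only
  rw [aCatInit_eq, aLoop_inv,
    core supported partial_ _ pw1 q1 q1_col,
    core supported partial_ _ pw2 q2 q2_col,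
    core supported partial_ _ pw3 q3 q3_col,
    core supported partial_ _ pw4 q4 q4_col,
    core supported partial_ _ pw5 q5 q5_col]
  simp only [catDict, List.nil_append, tableB, List.foldl_cons, List.foldl_nil]
  generalize ((["javascript", "python", "typescript"] : List String).filter _).map displaySkill = R1
  generalize ((_ : List String).filter _).map displaySkill = R2
  generalize ((_ : List String).filter _).map displaySkill = R3
  generalize ((_ : List String).filter _).map displaySkill = R4
  generalize ((_ : List String).filter _).map displaySkill = R5
  by_cases e1 : R1.isEmpty <;> by_cases e2 : R2.isEmpty <;> by_cases e3 : R3.isEmpty <;>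
    by_cases e4 : R4.isEmpty <;> by_cases e5 : R5.isEmpty <;>
    simp [PySem.Dict.items, List.filter, e1, e2, e3, e4, e5]
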